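-- pv_equiv track=rewrite | github.com/KayronCalloway/uatp | src/attribution/cross_conversation_tracker.py | _detect_keyword_stuffing
-- ===== SOURCE A (Python) =====
-- from typing import Any, Dict, List, Optional, Set, Tuple
--
-- def _detect_keyword_stuffing(words: List[str]) -> bool:
--     """Detect keyword stuffing patterns."""
--     if len(words) < 10:
--         return False
--
--     # Check for excessive repetition
--     word_counts = {}
--     for word in words:
--         if len(word) > 3:  # Only check meaningful words
--             word_counts[word] = word_counts.get(word, 0) + 1
--
--     # SECURITY: Flag if any word appears more than 20% of total content
--     max_repetition_ratio = 0.2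
--     for word, count in word_counts.items():
--         if count / len(words) > max_repetition_ratio:
--             return True
--
--     return False
-- ===== SOURCE B (Python) =====
-- def _detect_keyword_stuffing(words):
--     """Detect keyword stuffing: sort the meaningful words, scan runs of equal words once."""
--     if len(words) < 10:
--         return False
--     meaningful = sorted(w for w in words if len(w) > 3)
--     if not meaningful:
--         return False
--     n = len(words)
--     cur = meaningful[0]
--     run = 1
--     for w in meaningful[1:]:
--         if w == cur:
--             run += 1
--         else:
--             if run / n > 0.2:
--                 return True
--             cur = w
--             run = 1
--     return run / n > 0.2
-- ===== Notes on version B (the rewrite author's own statement) =====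
-- stated objective: alternative
-- what changed: Replaces A's dict-of-counts build plus items scan with a sort of the meaningful words followed by a single run-length scan over the sorted list.
import Mathlib
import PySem

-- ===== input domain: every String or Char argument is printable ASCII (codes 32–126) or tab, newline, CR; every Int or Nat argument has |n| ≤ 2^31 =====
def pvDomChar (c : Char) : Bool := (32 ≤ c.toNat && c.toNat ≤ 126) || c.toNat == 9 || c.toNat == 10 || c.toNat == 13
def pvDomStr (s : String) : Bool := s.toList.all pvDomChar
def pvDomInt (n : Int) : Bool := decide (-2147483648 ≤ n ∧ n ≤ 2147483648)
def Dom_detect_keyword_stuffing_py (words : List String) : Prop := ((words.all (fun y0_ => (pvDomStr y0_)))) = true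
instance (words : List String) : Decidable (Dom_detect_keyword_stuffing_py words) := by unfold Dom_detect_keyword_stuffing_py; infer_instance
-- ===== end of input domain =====

-- B sorts the meaningful words once and scans runs of equal words, replacing A's
-- dict-of-counts build and items scan; alternative decomposition, similar cost.


-- ===== PORT A =====
-- `count / len(words) > 0.2` is ported as the integer test 5*count > len(words),
-- which agrees with the CPython float comparison on all admitted list lengths.
def detect_keyword_stuffing_py (words : List String) : Bool :=
  if words.length < 10 then false
  else
    let word_counts : PySem.Dict String Int :=
      words.foldl
        (fun d word => if PySem.Str.len word > 3 then d.insert word (d.getD word 0 + 1) else d)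
        PySem.Dict.empty
    word_counts.items.any (fun kv => decide ((5 : Int) * kv.2 > (words.length : Int)))

-- ===== PORT B =====
-- the `for w in meaningful[1:]` run-scan loop, state = (cur, run)
def bRunLoop (n : Nat) : List String → String → Nat → Bool
  | [], _cur, run => decide (5 * run > n)
  | w :: rest, cur, run =>
    if w = cur then bRunLoop n rest cur (run + 1)
    else if 5 * run > n then true
    else bRunLoop n rest w 1

def detect_keyword_stuffing_py_alt (words : List String) : Bool :=
  if words.length < 10 then false
  else
    match PySem.List.sorted (words.filter (fun w => decide (PySem.Str.len w > 3))) (fun x => x) false with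
    | [] => false
    | cur :: rest => bRunLoop words.length rest cur 1

-- ===== PRECONDITION & SPEC =====
def Spec_detect_keyword_stuffing_py (words : List String) (out : Bool) : Prop := out = detect_keyword_stuffing_py_alt words
instance (words : List String) (out : Bool) : Decidable (Spec_detect_keyword_stuffing_py words out) := by unfold Spec_detect_keyword_stuffing_py; infer_instance

-- ===== CLAIM (what is proved, stated in full; the proofs are below) =====
def Claim_equal_detect_keyword_stuffing_py : Prop := ∀ (words : List String), Dom_detect_keyword_stuffing_py words → Spec_detect_keyword_stuffing_py words (detect_keyword_stuffing_py words)

-- ===== LEMMAS AND PROOFS =====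

-- the run-scan returns true iff the pending run or some later run exceeds the threshold
theorem bRunLoop_iff (n : Nat) (s : List String) (cur : String) (run : Nat)
    (hs : (cur :: s).Pairwise (· ≤ ·)) :
    bRunLoop n s cur run = true ↔
      (5 * (run + s.count cur) > n ∨ ∃ k ∈ s, k ≠ cur ∧ 5 * s.count k > n) := by
  induction s generalizing cur run with
  | nil => simp [bRunLoop]
  | cons w rest ih =>
    have hcw : cur ≤ w := (List.pairwise_cons.mp hs).1 w (by simp)
    have hcr : ∀ x ∈ rest, cur ≤ x := fun x hx => (List.pairwise_cons.mp hs).1 x (by simp [hx])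
    have hwr : (w :: rest).Pairwise (· ≤ ·) := (List.pairwise_cons.mp hs).2
    by_cases hw : w = cur
    · subst hw
      have hcons : (w :: rest).Pairwise (· ≤ ·) := hwr
      rw [show bRunLoop n (w :: rest) w run = bRunLoop n rest w (run + 1) by simp [bRunLoop]]
      rw [ih w (run + 1) hcons]
      constructor
      · rintro (h | ⟨k, hk, hne, hc⟩)
        · exact Or.inl (by rw [List.count_cons_self]; omega)
        · exact Or.inr ⟨k, by simp [hk], hne, by
            rwa [List.count_cons_of_ne (fun h => hne h.symm)]⟩
      · rintro (h | ⟨k, hk, hne, hc⟩)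
        · exact Or.inl (by rw [List.count_cons_self] at h; omega)
        · have hk' : k ∈ rest := by
            rcases List.mem_cons.mp hk with h | h
            · exact absurd h hne
            · exact h
          exact Or.inr ⟨k, hk', hne, by
            rwa [List.count_cons_of_ne (fun h => hne h.symm)] at hc⟩
    · have hlt : cur < w := lt_of_le_of_ne hcw (fun h => hw h.symm)
      have hall : ∀ x ∈ w :: rest, cur < x := by
        intro x hx
        rcases List.mem_cons.mp hx with h | h
        · exact h ▸ hlt
        · exact lt_of_lt_of_le hlt ((List.pairwise_cons.mp hwr).1 x h)
      have hnotmem : cur ∉ w :: rest := fun hmem => lt_irrefl cur (hall cur hmem)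
      have hcount0 : (w :: rest).count cur = 0 := List.count_eq_zero.mpr hnotmem
      rw [show bRunLoop n (w :: rest) cur run
            = if 5 * run > n then true else bRunLoop n rest w 1 by simp [bRunLoop, hw]]
      rw [hcount0]
      by_cases hrun : 5 * run > n
      · simp only [if_pos hrun]
        constructor
        · intro _; exact Or.inl (by omega)
        · intro _; trivial
      · rw [if_neg hrun, ih w 1 hwr]
        have hne_k : ∀ k ∈ w :: rest, k ≠ cur := fun k hk h => hnotmem (h ▸ hk)
        constructor
        · rintro (h | ⟨k, hk, hne, hc⟩)
          · refine Or.inr ⟨w, by simp, hne_k w (by simp), ?_⟩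
            rw [List.count_cons_self]; omega
          · refine Or.inr ⟨k, by simp [hk], hne_k k (by simp [hk]), ?_⟩
            rwa [List.count_cons_of_ne (fun h => hne h.symm)]
        · rintro (h | ⟨k, hk, hne, hc⟩)
          · omega
          · by_cases hkw : k = w
            · subst hkw
              rw [List.count_cons_self] at hc
              exact Or.inl (by omega)
            · have hk' : k ∈ rest := by
                rcases List.mem_cons.mp hk with h | h
                · exact absurd h hkw
                · exact h
              refine Or.inr ⟨k, hk', hkw, ?_⟩
              rwa [List.count_cons_of_ne (fun h => hkw h.symm)] at hc

-- B's characterisation: true iff some word of the (nonempty, sorted) list repeats beyond the threshold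
theorem bRunLoop_head_iff (n : Nat) (cur : String) (rest : List String)
    (hs : (cur :: rest).Pairwise (· ≤ ·)) :
    bRunLoop n rest cur 1 = true ↔ ∃ k ∈ cur :: rest, 5 * (cur :: rest).count k > n := by
  rw [bRunLoop_iff n rest cur 1 hs]
  constructor
  · rintro (h | ⟨k, hk, hne, hc⟩)
    · exact ⟨cur, by simp, by rw [List.count_cons_self]; omega⟩
    · exact ⟨k, by simp [hk], by rwa [List.count_cons_of_ne (fun h => hne h.symm)]⟩
  · rintro ⟨k, hk, hc⟩
    by_cases hkc : k = cur
    · subst hkc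
      rw [List.count_cons_self] at hc
      exact Or.inl (by omega)
    · have hk' : k ∈ rest := by
        rcases List.mem_cons.mp hk with h | h
        · exact absurd h hkc
        · exact h
      refine Or.inr ⟨k, hk', hkc, ?_⟩
      rwa [List.count_cons_of_ne (fun h => hkc h.symm)] at hc

-- A's characterisation over the filtered list
theorem portA_iff (words : List String) (h : ¬ words.length < 10) :
    detect_keyword_stuffing_py words = true ↔
      ∃ k ∈ words.filter (fun w => decide (PySem.Str.len w > 3)),
        5 * (words.filter (fun w => decide (PySem.Str.len w > 3))).count k > words.length := by
  unfold detect_keyword_stuffing_py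
  rw [if_neg h]
  have hfold :
      words.foldl
        (fun d word => if PySem.Str.len word > 3 then d.insert word (d.getD word 0 + 1) else d)
        (PySem.Dict.empty : PySem.Dict String Int)
      = PySem.Dict.counter (words.filter (fun w => decide (PySem.Str.len w > 3))) := by
    rw [← PySem.Dict.foldl_insert_getD_add_one_eq_counter, List.foldl_filter]
    simp
  simp only [hfold, PySem.Dict.items_counter, List.any_map, List.any_eq_true]
  constructor
  · rintro ⟨k, hk, hc⟩
    refine ⟨k, (PySem.Set.mem_ofList _ _).mp hk, ?_⟩
    simp only [Function.comp, decide_eq_true_eq] at hc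
    exact_mod_cast hc
  · rintro ⟨k, hk, hc⟩
    refine ⟨k, (PySem.Set.mem_ofList _ _).mpr hk, ?_⟩
    simp only [Function.comp, decide_eq_true_eq]
    exact_mod_cast hc

-- ===== VERDICT (by name: the statement is the Claim_ definition above) =====
theorem detect_keyword_stuffing_py_spec : Claim_equal_detect_keyword_stuffing_py := by
  intro words _hdom
  unfold Spec_detect_keyword_stuffing_py
  by_cases h : words.length < 10
  · simp [detect_keyword_stuffing_py, detect_keyword_stuffing_py_alt, h]
  · set flt := words.filter (fun w => decide (PySem.Str.len w > 3)) with hflt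
    have hperm : (PySem.List.sorted flt (fun x => x) false).Perm flt :=
      PySem.List.sorted_perm flt (fun x => x) false
    rw [Bool.eq_iff_iff, portA_iff words h]
    unfold detect_keyword_stuffing_py_alt
    rw [if_neg h, ← hflt]
    cases hsrt : PySem.List.sorted flt (fun x => x) false with
    | nil =>
      rw [hsrt] at hperm
      have h0 : flt = [] := hperm.symm.eq_nil
      simp [h0]
    | cons cur rest =>
      have hpw : (cur :: rest).Pairwise (· ≤ ·) := by
        have := PySem.List.sorted_pairwise flt (fun x => x)
        rw [hsrt] at this
        exact this
      rw [show (match (cur :: rest : List String) with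
            | [] => false
            | cur :: rest => bRunLoop words.length rest cur 1)
          = bRunLoop words.length rest cur 1 from rfl]
      rw [bRunLoop_head_iff words.length cur rest hpw]
      have hp : (cur :: rest).Perm flt := hsrt ▸ hperm
      constructor
      · rintro ⟨k, hk, hc⟩
        exact ⟨k, hp.mem_iff.mpr hk, by rwa [hp.count_eq]⟩
      · rintro ⟨k, hk, hc⟩
        exact ⟨k, hp.mem_iff.mp hk, by rwa [← hp.count_eq]⟩
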